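-- pv_equiv track=rewrite | github.com/BubaVV/codewars | py/vasya_clerk.py | tickets
-- ===== SOURCE A (Python) =====
-- def max_note(notes, value):
--     '''
--     :param notes: array of banknotes, read-only
--     :param value: amount of return
--     :return: index of banknote or None
--     '''
--     sorted_notes = sorted([x for x in notes if x<=value], reverse=True)
--     if len(sorted_notes) == 0:
--         return None
--     else:
--         return notes.index(sorted_notes[0])
--
-- def tickets(people):
--     PRICE = 25
--     cash = []
--     for request in people:
--         cash.append(request)
--         change = request - PRICE
--         while change > 0:
--             change_note = max_note(cash, change)
--             if change_note is None:
--                 return 'NO'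
--             change -= cash.pop(change_note)
--
--     return "YES"
-- ===== SOURCE B (Python) =====
-- def tickets(people):
--     cash = []  # maintained sorted in descending order at all times
--     for request in people:
--         # insert request keeping descending order (no re-sorting)
--         i = 0
--         while i < len(cash) and cash[i] >= request:
--             i += 1
--         cash.insert(i, request)
--         change = request - 25
--         while change > 0:
--             # largest note <= change is the first element <= change
--             j = 0
--             while j < len(cash) and cash[j] > change:
--                 j += 1
--             if j == len(cash):
--                 return 'NO'
--             change -= cash.pop(j)
--     return 'YES'
-- ===== Notes on version B (the rewrite author's own statement) =====
-- stated objective: faster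
-- what changed: Instead of re-sorting the whole cash list and running list.index on every while-iteration, B maintains the cash list sorted descending by incremental insertion and finds/pops the largest usable note with a single linear scan.
import Mathlib
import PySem

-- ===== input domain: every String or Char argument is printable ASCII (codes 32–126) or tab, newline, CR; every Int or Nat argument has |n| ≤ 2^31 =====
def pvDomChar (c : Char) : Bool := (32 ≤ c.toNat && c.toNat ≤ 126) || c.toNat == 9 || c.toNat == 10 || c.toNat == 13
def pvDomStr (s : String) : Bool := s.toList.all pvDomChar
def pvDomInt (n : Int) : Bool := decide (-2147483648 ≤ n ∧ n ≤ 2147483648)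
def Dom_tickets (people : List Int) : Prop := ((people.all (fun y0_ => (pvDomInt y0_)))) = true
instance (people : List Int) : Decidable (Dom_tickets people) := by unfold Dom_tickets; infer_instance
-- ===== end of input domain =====

-- B maintains the cash list sorted descending by incremental insertion and pops the largest
-- usable note with one linear scan, instead of A's re-sort + list.index on every iteration.


-- ===== PORT A =====
-- max_note: index (first occurrence) of the largest banknote <= value, or None
def maxNote (notes : List Int) (value : Int) : Option Nat :=
  match PySem.List.sorted (notes.filter (fun x => decide (x ≤ value))) (fun x => x) true with
  | [] => none
  | m :: _ => PySem.List.index? notes m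

-- the inner 'while change > 0' loop; none = the 'return NO' exit.
-- fuel only guards totality: every iteration pops one note, so fuel = cash.length + 1
-- at the call site is never exhausted
def changeLoopA (fuel : Nat) (cash : List Int) (change : Int) : Option (List Int) :=
  match fuel with
  | 0 => none
  | fuel + 1 =>
    if change > 0 then
      match maxNote cash change with
      | none => none
      | some i =>
        match PySem.List.pop? cash (i : Int) with
        | none => none  -- unreachable: the index returned by max_note is in range
        | some vr => changeLoopA fuel vr.2 (change - vr.1)
    else some cash

def ticketsGoA (people : List Int) (cash : List Int) : String :=
  match people with
  | [] => "YES"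
  | r :: rest =>
    match changeLoopA ((cash ++ [r]).length + 1) (cash ++ [r]) (r - 25) with
    | none => "NO"
    | some cash' => ticketsGoA rest cash'

def tickets (people : List Int) : String := ticketsGoA people []

-- ===== PORT B =====
-- insert r keeping descending order (the 'while cash[i] >= request' scan + insert)
def insDesc (cash : List Int) (r : Int) : List Int :=
  match cash with
  | [] => [r]
  | y :: ys => if r ≤ y then y :: insDesc ys r else r :: y :: ys

-- scan for the first element <= c and pop it (the 'while cash[j] > change' scan + pop)
def popLe (cash : List Int) (c : Int) : Option (Int × List Int) :=
  match cash with
  | [] => none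
  | y :: ys => if c < y then (popLe ys c).map (fun p => (p.1, y :: p.2)) else some (y, ys)

def changeLoopB (fuel : Nat) (cash : List Int) (change : Int) : Option (List Int) :=
  match fuel with
  | 0 => none
  | fuel + 1 =>
    if change > 0 then
      match popLe cash change with
      | none => none
      | some vr => changeLoopB fuel vr.2 (change - vr.1)
    else some cash

def ticketsGoB (people : List Int) (cash : List Int) : String :=
  match people with
  | [] => "YES"
  | r :: rest =>
    match changeLoopB ((insDesc cash r).length + 1) (insDesc cash r) (r - 25) with
    | none => "NO"
    | some cash' => ticketsGoB rest cash'

def tickets_alt (people : List Int) : String := ticketsGoB people []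

-- ===== PRECONDITION & SPEC =====
def Spec_tickets (people : List Int) (out : String) : Prop := out = tickets_alt people
instance (people : List Int) (out : String) : Decidable (Spec_tickets people out) := by unfold Spec_tickets; infer_instance

-- ===== CLAIM (what is proved, stated in full; the proofs are below) =====
def Claim_equal_tickets : Prop := ∀ (people : List Int), Dom_tickets people → Spec_tickets people (tickets people)

-- ===== LEMMAS AND PROOFS =====

-- descending order
def Desc (l : List Int) : Prop := l.Pairwise (fun a b => b ≤ a)

lemma mem_insDesc {l : List Int} {r a : Int} (ha : a ∈ insDesc l r) : a = r ∨ a ∈ l := by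
  induction l with
  | nil =>
    simp only [insDesc, List.mem_singleton] at ha
    exact Or.inl ha
  | cons y ys ih =>
    simp only [insDesc] at ha
    split at ha
    · rcases List.mem_cons.mp ha with h1 | h1
      · right; simp [h1]
      · rcases ih h1 with h2 | h2
        · left; exact h2
        · right; simp [h2]
    · rcases List.mem_cons.mp ha with h1 | h1
      · left; exact h1
      · right; exact h1

lemma desc_insDesc {l : List Int} (h : Desc l) (r : Int) : Desc (insDesc l r) := by
  induction l with
  | nil => simp [insDesc, Desc]
  | cons y ys ih =>
    rw [Desc, List.pairwise_cons] at h
    simp only [insDesc]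
    split
    · rename_i hr
      have hd := ih h.2
      rw [Desc, List.pairwise_cons]
      refine ⟨?_, hd⟩
      intro a ha
      rcases mem_insDesc ha with rfl | hm
      · exact hr
      · exact h.1 a hm
    · rename_i hr
      rw [Desc, List.pairwise_cons]
      constructor
      · intro a ha
        rcases List.mem_cons.mp ha with rfl | hm
        · omega
        · have := h.1 a hm; omega
      · exact List.pairwise_cons.mpr h

lemma perm_insDesc (l : List Int) (r : Int) : (insDesc l r).Perm (r :: l) := by
  induction l with
  | nil => simp [insDesc]
  | cons y ys ih =>
    simp only [insDesc]
    split
    · exact ((ih.cons y).trans (List.Perm.swap r y ys))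
    · exact List.Perm.refl _

lemma popLe_none_iff (l : List Int) (c : Int) :
    popLe l c = none ↔ ∀ x ∈ l, c < x := by
  induction l with
  | nil => simp [popLe]
  | cons y ys ih =>
    simp only [popLe]
    split
    · rename_i hy
      cases hp : popLe ys c with
      | none =>
        simp only [Option.map_none, true_iff]
        intro x hx
        rcases List.mem_cons.mp hx with rfl | hx
        · exact hy
        · exact (ih.mp hp) x hx
      | some p =>
        simp only [Option.map_some]
        constructor
        · intro h; simp at h
        · intro h
          have := ih.mpr (fun x hx => h x (by simp [hx]))
          rw [hp] at this; simp at this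
    · rename_i hy
      constructor
      · intro h; simp at h
      · intro h; have := h y (by simp); omega

-- popLe finds the first element ≤ c; in a descending list it is the maximum of the
-- elements ≤ c, and the remainder is l.erase of it
lemma popLe_some_spec {l : List Int} {c v : Int} {rest : List Int}
    (hd : Desc l) (h : popLe l c = some (v, rest)) :
    v ∈ l ∧ v ≤ c ∧ (∀ x ∈ l, x ≤ c → x ≤ v) ∧ rest = l.erase v := by
  induction l generalizing v rest with
  | nil => simp [popLe] at h
  | cons y ys ih =>
    rw [Desc, List.pairwise_cons] at hd
    simp only [popLe] at h
    split at h
    · rename_i hy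
      cases hp : popLe ys c with
      | none => rw [hp] at h; simp at h
      | some p =>
        rw [hp] at h
        simp only [Option.map_some, Option.some.injEq, Prod.mk.injEq] at h
        obtain ⟨h1, h2⟩ := h
        obtain ⟨hm, hvc, hmax, hrest⟩ := ih hd.2 (show popLe ys c = some (v, p.2) by rw [hp, ← h1])
        have hne : (y == v) = false := by simp; omega
        refine ⟨by simp [hm], hvc, ?_, ?_⟩
        · intro x hx hxc
          rcases List.mem_cons.mp hx with rfl | hx
          · omega
          · exact hmax x hx hxc
        · rw [← h2, hrest]
          simp [hne]
    · rename_i hy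
      cases h
      refine ⟨List.mem_cons_self .., by omega, ?_, by simp⟩
      intro x hx hxc
      rcases List.mem_cons.mp hx with rfl | hx
      · exact le_refl _
      · exact hd.1 x hx

-- A's max_note: none exactly when no note is ≤ c
lemma maxNote_none_iff (notes : List Int) (c : Int) :
    maxNote notes c = none ↔ ∀ x ∈ notes, c < x := by
  unfold maxNote
  cases hs : PySem.List.sorted (notes.filter (fun x => decide (x ≤ c))) (fun x => x) true with
  | nil =>
    rw [PySem.List.sorted_eq_nil_iff] at hs
    simp only [true_iff]
    intro x hx
    by_contra hc
    have hmem : x ∈ notes.filter (fun x => decide (x ≤ c)) := by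
      simp only [List.mem_filter, decide_eq_true_eq]
      exact ⟨hx, by omega⟩
    rw [hs] at hmem
    simp at hmem
  | cons m t =>
    have hm : m ∈ notes.filter (fun x => decide (x ≤ c)) := by
      have hperm := PySem.List.sorted_perm (xs := notes.filter (fun x => decide (x ≤ c))) (key := fun x => x) (rev := true)
      rw [hs] at hperm
      exact hperm.mem_iff.mp (by simp)
    simp only [List.mem_filter, decide_eq_true_eq] at hm
    constructor
    · intro h
      rw [PySem.List.index?_eq_none_iff] at h
      exact absurd hm.1 h
    · intro h
      exact absurd (h m hm.1) (by omega)

-- A's max_note: when it returns an index, popping there pops the maximum note ≤ c and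
-- leaves notes.erase of that note
lemma maxNote_some_spec {notes : List Int} {c : Int} {i : Nat}
    (h : maxNote notes c = some i) :
    ∃ v, v ∈ notes ∧ v ≤ c ∧ (∀ x ∈ notes, x ≤ c → x ≤ v) ∧
      PySem.List.pop? notes (i : Int) = some (v, notes.erase v) := by
  unfold maxNote at h
  cases hs : PySem.List.sorted (notes.filter (fun x => decide (x ≤ c))) (fun x => x) true with
  | nil => rw [hs] at h; simp at h
  | cons m t =>
    rw [hs] at h
    have hm : m ∈ notes.filter (fun x => decide (x ≤ c)) := by
      have hperm := PySem.List.sorted_perm (xs := notes.filter (fun x => decide (x ≤ c))) (key := fun x => x) (rev := true)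
      rw [hs] at hperm
      exact hperm.mem_iff.mp (by simp)
    simp only [List.mem_filter, decide_eq_true_eq] at hm
    refine ⟨m, hm.1, hm.2, ?_, ?_⟩
    · intro x hx hxc
      exact PySem.List.key_head_sorted_rev_ge _ _ hs x
        (List.mem_filter.mpr ⟨hx, by simpa using hxc⟩)
    · obtain ⟨hk, hget, _⟩ := PySem.List.getElem_of_index?_eq_some h
      have hidx : PySem.List.index? notes m = some i := h
      rw [PySem.List.index?_eq_idxOf?] at hidx
      have hio : notes.idxOf m = i := by
        have := List.idxOf_eq_getD_idxOf? (a := m) (l := notes)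
        rw [hidx] at this
        simpa using this
      rw [PySem.List.pop?_natCast notes i hk, hget]
      rw [← hio, List.eraseIdx_idxOf_eq_erase]

-- relation between the two loop results
def ORel (oa ob : Option (List Int)) : Prop :=
  match oa, ob with
  | none, none => True
  | some a, some b => b.Perm a ∧ Desc b
  | _, _ => False

lemma desc_erase {l : List Int} (hd : Desc l) (v : Int) : Desc (l.erase v) :=
  List.Pairwise.sublist (List.erase_sublist ..) hd

lemma changeLoop_rel (fa : Nat) :
    ∀ (fb : Nat) (a b : List Int) (c : Int), a.length < fa → b.length < fb → b.Perm a → Desc b →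
      ORel (changeLoopA fa a c) (changeLoopB fb b c) := by
  induction fa with
  | zero => intro fb a b c hfa _ _ _; omega
  | succ fa ih =>
    intro fb a b c hfa hfb hp hd
    cases fb with
    | zero => omega
    | succ fb =>
    have hlen : b.length = a.length := hp.length_eq
    simp only [changeLoopA, changeLoopB]
    by_cases hc : c > 0
    · rw [if_pos hc, if_pos hc]
      cases hmn : maxNote a c with
      | none =>
        rw [(popLe_none_iff b c).mpr fun x hx =>
          (maxNote_none_iff a c).mp hmn x (hp.mem_iff.mp hx)]
        exact trivial
      | some i =>
        obtain ⟨v, hvm, hvc, hmax, hpop⟩ := maxNote_some_spec hmn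
        simp only [hpop]
        cases hbp : popLe b c with
        | none =>
          have h1 := (popLe_none_iff b c).mp hbp v (hp.mem_iff.mpr hvm)
          exact absurd hvc (by omega)
        | some vr =>
          obtain ⟨w, rest⟩ := vr
          obtain ⟨hwm, hwc, hwmax, hrest⟩ := popLe_some_spec hd hbp
          have hwv : w = v :=
            le_antisymm (hmax w (hp.mem_iff.mp hwm) hwc) (hwmax v (hp.mem_iff.mpr hvm) hvc)
          subst hwv hrest
          have hla : (a.erase w).length < fa := by
            have h1 := List.length_erase_of_mem hvm
            have h2 := List.length_pos_of_mem hvm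
            omega
          have hlb : (b.erase w).length < fb := by
            have h1 := List.length_erase_of_mem hwm
            have h2 := List.length_pos_of_mem hwm
            omega
          exact ih fb (a.erase w) (b.erase w) (c - w) hla hlb (hp.erase w) (desc_erase hd w)
    · rw [if_neg hc, if_neg hc]
      exact ⟨hp, hd⟩

lemma ticketsGo_eq (people : List Int) :
    ∀ (a b : List Int), b.Perm a → Desc b → ticketsGoA people a = ticketsGoB people b := by
  induction people with
  | nil => intro a b _ _; rfl
  | cons r rest ih =>
    intro a b hp hd
    have hperm : (insDesc b r).Perm (a ++ [r]) :=
      ((perm_insDesc b r).trans (hp.cons r)).trans (List.perm_append_singleton r a).symm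
    have hrel := changeLoop_rel ((a ++ [r]).length + 1) ((insDesc b r).length + 1)
      (a ++ [r]) (insDesc b r) (r - 25) (by omega) (by omega) hperm (desc_insDesc hd r)
    simp only [ticketsGoA, ticketsGoB]
    cases hA : changeLoopA ((a ++ [r]).length + 1) (a ++ [r]) (r - 25) with
    | none =>
      cases hB : changeLoopB ((insDesc b r).length + 1) (insDesc b r) (r - 25) with
      | none => rfl
      | some b' => rw [hA, hB] at hrel; exact absurd hrel (by simp [ORel])
    | some a' =>
      cases hB : changeLoopB ((insDesc b r).length + 1) (insDesc b r) (r - 25) with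
      | none => rw [hA, hB] at hrel; exact absurd hrel (by simp [ORel])
      | some b' =>
        rw [hA, hB] at hrel
        exact ih a' b' hrel.1 hrel.2

-- ===== VERDICT (by name: the statement is the Claim_ definition above) =====
theorem tickets_spec : Claim_equal_tickets := by
  intro people _
  unfold Spec_tickets tickets tickets_alt
  exact ticketsGo_eq people [] [] (List.Perm.refl _) (by simp [Desc])
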